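-- pv_equiv track=rewrite | github.com/Mazhar004/text-classification | ml/api_inference.py | sen_filter
-- ===== SOURCE A (Python) =====
-- def sen_filter(query):
--     space = '/\\,?!#.|;"(){}[]<>+-=*^%'
--     no_space = "'-"
--     for i in space:
--         query = query.replace(i, ' ')
--     for i in no_space:
--         query = query.replace(i, '')
--     return query.lower().strip()
-- ===== SOURCE B (Python) =====
-- def sen_filter(query):
--     space = set('/\\,?!#.|;"(){}[]<>+-=*^%')
--     no_space = set("'-")
--     # one pass: classify each character (space-set wins, so '-' -> ' ' like A)
--     cleaned = ''.join(' ' if c in space else '' if c in no_space else c for c in query)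
--     return cleaned.lower().strip()
-- ===== Notes on version B (the rewrite author's own statement) =====
-- stated objective: simpler
-- what changed: A makes ~27 chained full-string replace passes (one per punctuation character); B classifies each character in a single pass over the query via two membership sets, joining the results before lower().strip().
import Mathlib
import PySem

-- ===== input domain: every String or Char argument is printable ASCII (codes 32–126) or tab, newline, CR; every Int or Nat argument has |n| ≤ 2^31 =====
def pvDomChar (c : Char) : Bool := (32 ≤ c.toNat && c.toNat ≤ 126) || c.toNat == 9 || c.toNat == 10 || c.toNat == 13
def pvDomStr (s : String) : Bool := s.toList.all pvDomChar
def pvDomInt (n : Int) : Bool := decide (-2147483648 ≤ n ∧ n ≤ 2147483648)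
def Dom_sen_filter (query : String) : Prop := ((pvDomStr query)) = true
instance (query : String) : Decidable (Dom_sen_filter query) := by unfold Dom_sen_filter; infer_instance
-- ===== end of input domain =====

-- B replaces A's 25 chained full-string replace passes by a single character-classifying pass; objective: simpler/faster single traversal.
set_option maxHeartbeats 1000000


-- ===== PORT A =====
def sen_filter (query : String) : String :=
  let space : String := "/\\,?!#.|;\"(){}[]<>+-=*^%"
  let no_space : String := "'-"
  let q1 := space.toList.foldl (fun q i => PySem.Str.replace q (String.ofList [i]) " ") query
  let q2 := no_space.toList.foldl (fun q i => PySem.Str.replace q (String.ofList [i]) "") q1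
  PySem.Str.strip (PySem.Str.lower q2)

-- ===== PORT B =====
def bSpace : List Char := "/\\,?!#.|;\"(){}[]<>+-=*^%".toList
def bNoSpace : List Char := "'-".toList

def sen_filter_alt (query : String) : String :=
  let cleaned := query.toList.foldl
    (fun acc c =>
      if c ∈ bSpace then acc ++ [' ']
      else if c ∈ bNoSpace then acc
      else acc ++ [c]) []
  PySem.Str.strip (PySem.Str.lower (String.ofList cleaned))

-- ===== PRECONDITION & SPEC =====
def Spec_sen_filter (query : String) (out : String) : Prop := out = sen_filter_alt query
instance (query : String) (out : String) : Decidable (Spec_sen_filter query out) := by unfold Spec_sen_filter; infer_instance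

-- ===== CLAIM (what is proved, stated in full; the proofs are below) =====
def Claim_equal_sen_filter : Prop := ∀ (query : String), Dom_sen_filter query → Spec_sen_filter query (sen_filter query)

-- ===== LEMMAS AND PROOFS =====

-- character classifier both programs compute
def coreF (c : Char) : List Char :=
  if c ∈ bSpace then [' '] else if c ∈ bNoSpace then [] else [c]

-- single-char replace is a flatMap
theorem replace_go_single (a : Char) (new : List Char) :
    ∀ (s : List Char) (fuel : Nat) (acc : List Char), s.length ≤ fuel →
      PySem.Chars.replace.go [a] new fuel s acc
        = acc.reverse ++ s.flatMap (fun c => if c = a then new else [c]) := by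
  intro s
  induction s with
  | nil => intro fuel acc _; cases fuel <;> simp [PySem.Chars.replace.go]
  | cons c t ih =>
      intro fuel acc h
      cases fuel with
      | zero => simp at h
      | succ n =>
          rw [PySem.Chars.replace.go]
          by_cases hc : c = a
          · subst hc
            simp only [List.isPrefixOf, BEq.rfl, Bool.and_true, if_pos]
            have hd : List.drop [c].length (c :: t) = t := rfl
            rw [hd, ih n (new.reverse ++ acc) (by simpa using h)]
            simp
          · have : ([a].isPrefixOf (c :: t)) = false := by
              simp [List.isPrefixOf]
              exact fun h' => hc (by simpa [eq_comm] using h')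
            rw [this]
            simp only [Bool.false_eq_true, if_false]
            rw [ih n (c :: acc) (by simpa using Nat.le_of_succ_le_succ h)]
            simp [hc]

theorem replace_single (s : List Char) (a : Char) (new : List Char) :
    PySem.Chars.replace s [a] new = s.flatMap (fun c => if c = a then new else [c]) := by
  unfold PySem.Chars.replace
  simp [replace_go_single a new s s.length [] (le_refl _)]

-- a fold of flatMaps is a flatMap of the per-character fold
theorem foldl_flatMap_comm (ps : List Char) (g : Char → Char → List Char) :
    ∀ (s : List Char),
      ps.foldl (fun q i => q.flatMap (g i)) s
        = s.flatMap (fun c => ps.foldl (fun q i => q.flatMap (g i)) [c]) := by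
  induction ps with
  | nil => intro s; simp
  | cons p ps ih =>
      intro s
      simp only [List.foldl_cons]
      rw [ih (s.flatMap (g p)), List.flatMap_assoc]
      congr 1
      funext c
      simp only [List.flatMap_cons, List.flatMap_nil, List.append_nil]
      exact (ih (g p c)).symm

theorem foldl_fixed {α β : Type} (ps : List β) (F : α → β → α) (s : α)
    (h : ∀ i ∈ ps, F s i = s) : ps.foldl F s = s := by
  induction ps with
  | nil => rfl
  | cons p ps ih =>
      simp only [List.foldl_cons, h p (by simp)]
      exact ih (fun i hi => h i (by simp [hi]))

def spFold (s : List Char) : List Char :=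
  bSpace.foldl (fun q i => q.flatMap (fun x => if x = i then [' '] else [x])) s
def nsFold (s : List Char) : List Char :=
  bNoSpace.foldl (fun q i => q.flatMap (fun x => if x = i then [] else [x])) s

theorem chain_char (c : Char) : nsFold (spFold [c]) = coreF c := by
  by_cases hc : c ∈ bSpace
  · have hc' : c ∈ ['/', '\\', ',', '?', '!', '#', '.', '|', ';', '"', '(', ')', '{', '}',
        '[', ']', '<', '>', '+', '-', '=', '*', '^', '%'] := by
      simpa [bSpace] using hc
    fin_cases hc' <;> decide
  · by_cases hn : c ∈ bNoSpace
    · have hn' : c = '\'' := by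
        have : c ∈ ['\'', '-'] := by simpa [bNoSpace] using hn
        fin_cases this
        · rfl
        · exact absurd (by decide) hc
      subst hn'; decide
    · have hfix : ∀ (L : List Char) (rep : List Char), (∀ i ∈ L, c ≠ i) →
          L.foldl (fun q i => q.flatMap (fun x => if x = i then rep else [x])) [c] = [c] := by
        intro L rep hL
        exact foldl_fixed L _ [c] (fun i hi => by simp [hL i hi])
      have h1 : spFold [c] = [c] :=
        hfix bSpace [' '] (fun i hi h => hc (h ▸ hi))
      have h2 : nsFold [c] = [c] :=
        hfix bNoSpace [] (fun i hi h => hn (h ▸ hi))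
      rw [nsFold, spFold] at *
      rw [h1, h2]
      simp [coreF, hc, hn]

theorem toList_foldl_replace (ps : List Char) (rep : String) :
    ∀ (q : String),
      (ps.foldl (fun q i => PySem.Str.replace q (String.ofList [i]) rep) q).toList
        = ps.foldl (fun l i => PySem.Chars.replace l [i] rep.toList) q.toList := by
  induction ps with
  | nil => intro q; rfl
  | cons p ps ih =>
      intro q
      simp only [List.foldl_cons]
      rw [ih]
      have hm : (String.ofList [p]).toList = [p] := by simp
      simp [PySem.Str.toList_replace, hm]

theorem a_core (q : String) :
    ((("'-".toList).foldl (fun q i => PySem.Str.replace q (String.ofList [i]) "")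
      (("/\\,?!#.|;\"(){}[]<>+-=*^%".toList).foldl
        (fun q i => PySem.Str.replace q (String.ofList [i]) " ") q))).toList
      = q.toList.flatMap coreF := by
  rw [toList_foldl_replace, toList_foldl_replace]
  simp only [replace_single]
  have hsp : ∀ s : List Char,
      ("/\\,?!#.|;\"(){}[]<>+-=*^%".toList).foldl
        (fun l i => l.flatMap (fun c => if c = i then " ".toList else [c])) s = spFold s := by
    intro s; rfl
  have hns : ∀ s : List Char,
      ("'-".toList).foldl
        (fun l i => l.flatMap (fun c => if c = i then "".toList else [c])) s = nsFold s := by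
    intro s; rfl
  rw [hsp, hns]
  rw [nsFold, foldl_flatMap_comm, spFold, foldl_flatMap_comm]
  rw [List.flatMap_assoc]
  have hfun : (fun x : Char =>
      List.flatMap (fun c => List.foldl (fun q i => q.flatMap (fun y => if y = i then ([] : List Char) else [y])) [c] bNoSpace)
        (List.foldl (fun q i => q.flatMap (fun y => if y = i then [' '] else [y])) [x] bSpace))
      = coreF := by
    funext c
    rw [← chain_char c, nsFold]
    exact (foldl_flatMap_comm bNoSpace _ _).symm
  rw [hfun]

theorem b_core (q : String) :
    q.toList.foldl
      (fun acc c =>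
        if c ∈ bSpace then acc ++ [' ']
        else if c ∈ bNoSpace then acc
        else acc ++ [c]) []
      = q.toList.flatMap coreF := by
  have : ∀ (l acc : List Char),
      l.foldl (fun acc c =>
        if c ∈ bSpace then acc ++ [' ']
        else if c ∈ bNoSpace then acc
        else acc ++ [c]) acc
      = l.foldl (fun acc c => acc ++ coreF c) acc := by
    intro l acc
    apply PySem.List.foldl_congr_mem
    intro acc c _
    simp only [coreF]
    split_ifs <;> simp
  rw [this, PySem.List.foldl_append_eq_flatMap]
  simp

-- ===== VERDICT (by name: the statement is the Claim_ definition above) =====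
theorem sen_filter_spec : Claim_equal_sen_filter := by
  intro query _
  show sen_filter query = sen_filter_alt query
  unfold sen_filter sen_filter_alt
  dsimp only
  have hA := a_core query
  have hB := b_core query
  have : ((("'-".toList).foldl (fun q i => PySem.Str.replace q (String.ofList [i]) "")
      (("/\\,?!#.|;\"(){}[]<>+-=*^%".toList).foldl
        (fun q i => PySem.Str.replace q (String.ofList [i]) " ") query)))
      = String.ofList (query.toList.flatMap coreF) := by
    apply String.toList_injective
    rw [hA]
    simp
  rw [this, hB]
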